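-- pv_equiv track=rewrite | github.com/mbeavitt/trash-py | src/trash_py/arrays.py | _collapse_kmers
-- ===== SOURCE A (Python) =====
-- def _collapse_kmers(names: list[str], counts: list[int], max_edit: int) -> list[tuple[list[str], int]]:
--     """Greedy cluster by Hamming distance ≤ max_edit on same-length kmers.
--
--     Anchors are chosen in ascending-count order; ties broken alphabetically.
--     """
--     pairs = sorted(zip(names, counts), key=lambda p: (p[1], p[0]))
--     names = [p[0] for p in pairs]
--     counts = [p[1] for p in pairs]
--
--     clusters: list[tuple[list[str], int]] = []
--     i = 0
--     while i < len(names):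
--         cluster_names = [names[i]]
--         cluster_count = counts[i]
--         if i + 1 < len(names):
--             anchor = names[i]
--             to_merge = [j for j in range(i + 1, len(names))
--                         if _hamming_le(anchor, names[j], max_edit)]
--             for j in to_merge:
--                 cluster_count += counts[j]
--                 cluster_names.append(names[j])
--             for j in reversed(to_merge):
--                 del names[j]
--                 del counts[j]
--         clusters.append((cluster_names, cluster_count))
--         i += 1
--     return clusters
--
-- def _hamming_le(a: str, b: str, k: int) -> bool:
--     if len(a) != len(b):
--         return False
--     d = 0
--     for x, y in zip(a, b):
--         if x != y:
--             d += 1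
--             if d > k:
--                 return False
--     return True
-- ===== SOURCE B (Python) =====
-- def _collapse_kmers(names: list[str], counts: list[int], max_edit: int) -> list[tuple[list[str], int]]:
--     """Greedy Hamming clustering, written as a partition recursion over one
--     list of (name, count) pairs instead of parallel index bookkeeping."""
--     pending = sorted(zip(names, counts), key=lambda p: (p[1], p[0]))
--     clusters: list[tuple[list[str], int]] = []
--     while pending:
--         (anchor, total), rest = pending[0], pending[1:]
--         members = [anchor]
--         kept = []
--         for name, count in rest:
--             if _close(anchor, name, max_edit):
--                 members.append(name)
--                 total += count
--             else:
--                 kept.append((name, count))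
--         clusters.append((members, total))
--         pending = kept
--     return clusters
--
--
-- def _close(a: str, b: str, k: int) -> bool:
--     return len(a) == len(b) and sum(x != y for x, y in zip(a, b)) <= max(k, 0)
-- ===== Notes on version B (the rewrite author's own statement) =====
-- stated objective: faster
-- what changed: B recurses on one list of (name,count) pairs, splitting each anchor's tail into merged and kept members in a single pass, instead of A's while loop over two parallel lists with a to_merge index list and reversed in-place deletions (each del shifts the list); B's distance test is a closed-form mismatch count clamped at max(k,0) instead of A's early-exit counter.
import Mathlib
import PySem

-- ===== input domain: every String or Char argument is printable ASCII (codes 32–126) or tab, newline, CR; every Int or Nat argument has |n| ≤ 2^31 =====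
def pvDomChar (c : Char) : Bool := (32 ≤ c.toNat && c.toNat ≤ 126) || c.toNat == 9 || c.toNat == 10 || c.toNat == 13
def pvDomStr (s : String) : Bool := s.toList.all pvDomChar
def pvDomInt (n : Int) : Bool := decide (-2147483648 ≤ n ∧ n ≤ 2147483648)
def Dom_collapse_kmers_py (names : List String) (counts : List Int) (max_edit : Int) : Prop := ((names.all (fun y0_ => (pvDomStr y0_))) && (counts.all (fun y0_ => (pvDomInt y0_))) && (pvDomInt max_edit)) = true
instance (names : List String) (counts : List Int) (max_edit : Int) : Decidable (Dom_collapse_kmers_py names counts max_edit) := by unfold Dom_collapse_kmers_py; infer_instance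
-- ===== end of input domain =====

-- B replaces A's while loop over two parallel lists (to_merge index list, reversed in-place
-- deletions) by a partition recursion over one list of (name, count) pairs; same return value.

-- ===== PORT A =====

-- _hamming_le's counting loop: d is the running mismatch count
def pvHamLoop (zs : List (Char × Char)) (d k : Int) : Bool :=
  match zs with
  | [] => true
  | (x, y) :: t => if x ≠ y then (if d + 1 > k then false else pvHamLoop t (d + 1) k) else pvHamLoop t d k

def hamming_le_py (a b : String) (k : Int) : Bool :=
  if PySem.Str.len a ≠ PySem.Str.len b then false
  else pvHamLoop (a.toList.zip b.toList) 0 k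

-- 'del l[j]' repeated never grows the list (cited by pvLoopA's decreasing_by)
theorem pvEraseFold_le {α : Type} : ∀ (js : List Int) (l : List α),
    (js.foldl (fun l j => l.eraseIdx j.toNat) l).length ≤ l.length := by
  intro js
  induction js with
  | nil => intro l; simp
  | cons j t ih =>
      intro l
      simpa using le_trans (ih (l.eraseIdx j.toNat)) (List.length_eraseIdx_le l j.toNat)

-- A's while loop, state = (names, counts, i); every index used is in range on reachable states
def pvLoopA (k : Int) (ns : List String) (cs : List Int) (i : Nat) : List (List String × Int) :=
  if h : i < ns.length then
    let anchor := ns.getD i ""          -- names[i]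
    let c0 := cs.getD i 0               -- counts[i]
    if i + 1 < ns.length then
      let to_merge := (PySem.List.pyRange ((i : Int) + 1) (PySem.List.len ns) 1).filter
          (fun j => hamming_le_py anchor (PySem.List.pyGetD ns j "") k)
      -- 'for j in to_merge: cluster_count += counts[j]; cluster_names.append(names[j])'
      let st := to_merge.foldl (fun (st : List String × Int) j =>
          (st.1 ++ [PySem.List.pyGetD ns j ""], st.2 + PySem.List.pyGetD cs j 0)) ([anchor], c0)
      -- 'for j in reversed(to_merge): del names[j]; del counts[j]'  (j ≥ 0 always)
      let ns' := to_merge.reverse.foldl (fun l j => l.eraseIdx j.toNat) ns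
      let cs' := to_merge.reverse.foldl (fun l j => l.eraseIdx j.toNat) cs
      (st.1, st.2) :: pvLoopA k ns' cs' (i + 1)
    else ([anchor], c0) :: pvLoopA k ns cs (i + 1)
  else []
termination_by ns.length - i
decreasing_by
  · have := pvEraseFold_le (((PySem.List.pyRange ((i : Int) + 1) (PySem.List.len ns) 1).filter
          (fun j => hamming_le_py (ns.getD i "") (PySem.List.pyGetD ns j "") k)).reverse) ns
    omega
  · omega

def collapse_kmers_py (names : List String) (counts : List Int) (max_edit : Int) : List (List String × Int) :=
  let pairs := PySem.List.sorted2 (names.zip counts) (fun p => p.2) (fun p => p.1)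
  let ns := pairs.map (fun p => p.1)
  let cs := pairs.map (fun p => p.2)
  pvLoopA max_edit ns cs 0

-- ===== PORT B =====

def close_py (a b : String) (k : Int) : Bool :=
  (PySem.Str.len a == PySem.Str.len b) &&
    (((a.toList.zip b.toList).map (fun p => if p.1 ≠ p.2 then (1 : Int) else 0)).sum ≤ max k 0)

-- the body of B's for loop over rest: state = (members, total, kept)
def pvStepB (k : Int) (anchor : String) (rest : List (String × Int))
    (init : List String × Int × List (String × Int)) : List String × Int × List (String × Int) :=
  rest.foldl (fun st p =>
    if close_py anchor p.1 k then (st.1 ++ [p.1], st.2.1 + p.2, st.2.2)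
    else (st.1, st.2.1, st.2.2 ++ [p])) init

-- what the one-pass partition computes (cited by pvLoopB's decreasing_by)
theorem pvStepB_spec (k : Int) (anchor : String) : ∀ (rest : List (String × Int))
    (ms : List String) (t : Int) (kp : List (String × Int)),
    pvStepB k anchor rest (ms, t, kp) =
      (ms ++ ((rest.filter (fun p => close_py anchor p.1 k)).map (fun p => p.1)),
       t + ((rest.filter (fun p => close_py anchor p.1 k)).map (fun p => p.2)).sum,
       kp ++ rest.filter (fun p => !close_py anchor p.1 k)) := by
  intro rest
  induction rest with
  | nil => intro ms t kp; simp [pvStepB]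
  | cons p rest ih =>
      intro ms t kp
      by_cases hp : close_py anchor p.1 k
      · simpa [pvStepB, hp, List.foldl_cons, add_assoc] using ih (ms ++ [p.1]) (t + p.2) kp
      · simpa [pvStepB, hp, List.foldl_cons] using ih ms t (kp ++ [p])

def pvLoopB (k : Int) : List (String × Int) → List (List String × Int)
  | [] => []
  | (anchor, c) :: rest =>
      let st := pvStepB k anchor rest ([anchor], c, [])
      (st.1, st.2.1) :: pvLoopB k st.2.2
termination_by ps => ps.length
decreasing_by
  simp only [pvStepB_spec]
  have := List.length_filter_le (fun p : String × Int => !close_py anchor p.1 k) rest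
  simp
  omega

def collapse_kmers_py_alt (names : List String) (counts : List Int) (max_edit : Int) : List (List String × Int) :=
  pvLoopB max_edit (PySem.List.sorted2 (names.zip counts) (fun p => p.2) (fun p => p.1))

-- ===== PRECONDITION & SPEC =====
def Spec_collapse_kmers_py (names : List String) (counts : List Int) (max_edit : Int) (out : List (List String × Int)) : Prop := out = collapse_kmers_py_alt names counts max_edit
instance (names : List String) (counts : List Int) (max_edit : Int) (out : List (List String × Int)) : Decidable (Spec_collapse_kmers_py names counts max_edit out) := by unfold Spec_collapse_kmers_py; infer_instance

-- ===== CLAIM (what is proved, stated in full; the proofs are below) =====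
def Claim_equal_collapse_kmers_py : Prop := ∀ (names : List String) (counts : List Int) (max_edit : Int), Dom_collapse_kmers_py names counts max_edit → Spec_collapse_kmers_py names counts max_edit (collapse_kmers_py names counts max_edit)

-- ===== LEMMAS AND PROOFS =====

-- A's early-exit mismatch loop equals 'running count reaches ≤ k, or no mismatch at all'
theorem pvHamLoop_eq (k : Int) : ∀ (zs : List (Char × Char)) (d : Int),
    pvHamLoop zs d k =
      decide ((zs.countP (fun p => p.1 ≠ p.2) : Int) = 0 ∨ d + (zs.countP (fun p => p.1 ≠ p.2) : Int) ≤ k) := by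
  intro zs
  induction zs with
  | nil => intro d; simp [pvHamLoop]
  | cons z t ih =>
      intro d
      obtain ⟨x, y⟩ := z
      by_cases hxy : x = y
      · simpa [pvHamLoop, hxy] using ih d
      · by_cases hk : d + 1 > k
        · have hstep : pvHamLoop ((x, y) :: t) d k = false := by simp [pvHamLoop, hxy, hk]
          rw [hstep, eq_comm, decide_eq_false_iff_not]
          simp only [List.countP_cons, ne_eq, hxy, not_false_eq_true, decide_true, if_pos]
          push_cast
          omega
        · have hstep : pvHamLoop ((x, y) :: t) d k = pvHamLoop t (d + 1) k := by
            simp [pvHamLoop, hxy, hk]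
          rw [hstep, ih (d + 1), decide_eq_decide]
          simp only [List.countP_cons, ne_eq, hxy, not_false_eq_true, decide_true, if_pos]
          push_cast
          omega

-- A's distance test = B's distance test
theorem ham_eq_close (a b : String) (k : Int) : hamming_le_py a b k = close_py a b k := by
  unfold hamming_le_py close_py
  have hsum : ((a.toList.zip b.toList).map (fun p => if p.1 ≠ p.2 then (1 : Int) else 0)).sum
      = ((a.toList.zip b.toList).countP (fun p => decide (p.1 ≠ p.2)) : Int) := by
    rw [← PySem.List.sum_map_ite_one_zero (fun p : Char × Char => decide (p.1 ≠ p.2))]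
    exact congrArg List.sum
      (List.map_congr_left (fun p _ => by by_cases h : p.1 = p.2 <;> simp [h]))
  by_cases hl : PySem.Str.len a = PySem.Str.len b
  · rw [if_neg (by simpa using hl), pvHamLoop_eq]
    have hb : (PySem.Str.len a == PySem.Str.len b) = true := by simpa using hl
    rw [hb, Bool.true_and, hsum, decide_eq_decide]
    have hc : 0 ≤ ((a.toList.zip b.toList).countP (fun p => decide (p.1 ≠ p.2)) : Int) :=
      Int.natCast_nonneg _
    simp only [ne_eq]
    omega
  · rw [if_pos (by simpa using hl)]
    have hb : (PySem.Str.len a == PySem.Str.len b) = false := by simpa using hl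
    rw [hb, Bool.false_and]

-- getD at the seam of an append
theorem pvGetD_mid {α : Type} (u : List α) (x : α) (v : List α) (d : α) :
    (u ++ x :: v).getD u.length d = x := by
  simp [List.getD]

theorem pvDrop_mid {α : Type} (u : List α) (x : α) (v : List α) :
    (u ++ x :: v).drop (u.length + 1) = v := by
  simp

theorem pvErase_mid {α : Type} : ∀ (u : List α) (x : α) (v : List α),
    (u ++ x :: v).eraseIdx u.length = u ++ v := by
  intro u
  induction u with
  | nil => intro x v; simp
  | cons y u ih => intro x v; simp [ih]

-- deleting from a map = mapping the deletion
theorem pvEraseFold_map {α β : Type} (f : α → β) : ∀ (js : List Int) (l : List α),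
    js.foldl (fun l j => l.eraseIdx j.toNat) (l.map f) =
      (js.foldl (fun l j => l.eraseIdx j.toNat) l).map f := by
  intro js
  induction js with
  | nil => intro l; simp
  | cons j t ih => intro l; simp only [List.foldl_cons]; rw [List.eraseIdx_map]; exact ih _

-- the reversed index-deletion loop removes exactly the tail elements satisfying P
theorem pvDelete {α : Type} (P : α → Bool) (d : α) : ∀ (tail front : List α),
    ((((PySem.List.pyRange (front.length : Int) (PySem.List.len (front ++ tail)) 1).filter
        (fun j => P (PySem.List.pyGetD (front ++ tail) j d))).reverse).foldl
      (fun l j => l.eraseIdx j.toNat) (front ++ tail)) = front ++ tail.filter (fun x => !P x) := by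
  intro tail
  induction tail with
  | nil =>
      intro front
      rw [PySem.List.pyRange_one_eq_nil (by simp)]
      simp
  | cons x tl ih =>
      intro front
      simp only [PySem.List.len_eq, List.length_append, List.length_cons]
      push_cast
      rw [PySem.List.pyRange_one_cons (by omega)]
      have hget : PySem.List.pyGetD (front ++ x :: tl) (front.length : Int) d = x := by
        rw [PySem.List.pyGetD_natCast, pvGetD_mid]
      have key := ih (front ++ [x])
      rw [List.append_assoc, List.singleton_append] at key
      simp only [PySem.List.len_eq, List.length_append, List.length_cons, List.length_nil,
        zero_add] at key
      push_cast at key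
      by_cases hx : P x
      · rw [List.filter_cons_of_pos (by rw [hget]; exact hx), List.reverse_cons,
          List.foldl_append, key]
        simp only [List.foldl_cons, List.foldl_nil, Int.toNat_natCast]
        rw [List.append_assoc, List.singleton_append, pvErase_mid,
          List.filter_cons_of_neg (by simp [hx])]
      · rw [List.filter_cons_of_neg (by rw [hget]; simpa using hx), key,
          List.filter_cons_of_pos (by simp [hx]), List.append_assoc, List.singleton_append]

-- the selection loop collects exactly the tail elements satisfying P
theorem pvSelect {α : Type} (P : α → Bool) (d : α) (front : List α) (x : α) (tail : List α) :
    (((PySem.List.pyRange ((front.length : Int) + 1) (PySem.List.len (front ++ x :: tail)) 1).filter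
        (fun j => P (PySem.List.pyGetD (front ++ x :: tail) j d))).map
      (fun j => PySem.List.pyGetD (front ++ x :: tail) j d)) = tail.filter P := by
  rw [show (fun j => P (PySem.List.pyGetD (front ++ x :: tail) j d)) =
      (P ∘ fun j => PySem.List.pyGetD (front ++ x :: tail) j d) from rfl,
    ← List.filter_map]
  have hm := PySem.List.map_pyGetD_pyRange (front ++ x :: tail) d
      (a := (front.length : Int) + 1) (by positivity)
  rw [hm]
  have ht : ((front.length : Int) + 1).toNat = front.length + 1 := by omega
  rw [ht, pvDrop_mid]

-- A's loop past the end of the list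
theorem pvLoopA_nil (k : Int) (ns : List String) (cs : List Int) (i : Nat)
    (h : ns.length ≤ i) : pvLoopA k ns cs i = [] := by
  rw [pvLoopA, dif_neg (by omega)]

-- A's loop on the last element
theorem pvLoopA_single (k : Int) (pre : List (String × Int)) (a : String) (c : Int) :
    pvLoopA k ((pre ++ [(a, c)]).map (fun p => p.1)) ((pre ++ [(a, c)]).map (fun p => p.2))
      pre.length = [([a], c)] := by
  have hanchor : ((pre ++ [(a, c)]).map (fun p => p.1)).getD pre.length "" = a := by
    rw [List.map_append, List.map_cons]
    simp
  have hc0 : ((pre ++ [(a, c)]).map (fun p => p.2)).getD pre.length 0 = c := by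
    rw [List.map_append, List.map_cons]
    simp
  rw [pvLoopA, dif_pos (by simp)]
  simp only [hanchor, hc0, if_neg (show ¬ (pre.length + 1 <
      ((pre ++ [(a, c)]).map (fun p => p.1)).length) by simp)]
  rw [pvLoopA_nil _ _ _ _ (by simp)]

-- one full iteration of A's while loop, rest nonempty
set_option maxHeartbeats 1000000 in
theorem pvLoopA_cons (k : Int) (pre rest : List (String × Int)) (a : String) (c : Int)
    (hrest : rest ≠ []) :
    pvLoopA k ((pre ++ (a, c) :: rest).map (fun p => p.1))
        ((pre ++ (a, c) :: rest).map (fun p => p.2)) pre.length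
      = ([a] ++ ((rest.filter (fun p => hamming_le_py a p.1 k)).map (fun p => p.1)),
         c + ((rest.filter (fun p => hamming_le_py a p.1 k)).map (fun p => p.2)).sum)
        :: pvLoopA k ((pre ++ (a, c) :: rest.filter (fun p => !hamming_le_py a p.1 k)).map (fun p => p.1))
             ((pre ++ (a, c) :: rest.filter (fun p => !hamming_le_py a p.1 k)).map (fun p => p.2))
             (pre.length + 1) := by
  have hanchor : ((pre ++ (a, c) :: rest).map (fun p => p.1)).getD pre.length "" = a := by
    rw [List.map_append, List.map_cons]
    simp
  have hc0 : ((pre ++ (a, c) :: rest).map (fun p => p.2)).getD pre.length 0 = c := by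
    rw [List.map_append, List.map_cons]
    simp
  have hcond : pre.length + 1 < ((pre ++ (a, c) :: rest).map (fun p => p.1)).length := by
    have : 0 < rest.length := List.length_pos_iff.mpr hrest
    simp
    omega
  have hns : ∀ j : Int, PySem.List.pyGetD ((pre ++ (a, c) :: rest).map (fun p => p.1)) j ""
      = (PySem.List.pyGetD (pre ++ (a, c) :: rest) j ("", (0 : Int))).1 :=
    fun j => PySem.List.pyGetD_map (fun p => p.1) _ j ("", 0)
  have hcs : ∀ j : Int, PySem.List.pyGetD ((pre ++ (a, c) :: rest).map (fun p => p.2)) j 0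
      = (PySem.List.pyGetD (pre ++ (a, c) :: rest) j ("", (0 : Int))).2 :=
    fun j => PySem.List.pyGetD_map (fun p => p.2) _ j ("", 0)
  have hlen : PySem.List.len ((pre ++ (a, c) :: rest).map (fun p => p.1))
      = PySem.List.len (pre ++ (a, c) :: rest) := by simp
  have hsel := pvSelect (fun p : String × Int => hamming_le_py a p.1 k) ("", (0 : Int))
      pre (a, c) rest
  have hdel := pvDelete (fun p : String × Int => hamming_le_py a p.1 k) ("", (0 : Int))
      rest (pre ++ [(a, c)])
  simp only [List.append_assoc, List.singleton_append, List.length_append, List.length_cons,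
    List.length_nil, zero_add] at hdel
  push_cast at hdel
  rw [pvLoopA, dif_pos (by simp)]
  simp only [hanchor, hc0, if_pos hcond, hns, hcs, hlen]
  rw [← List.foldl_map (f := fun j => PySem.List.pyGetD (pre ++ (a, c) :: rest) j ("", (0 : Int)))
      (g := fun (st : List String × Int) (p : String × Int) => (st.1 ++ [p.1], st.2 + p.2))]
  rw [hsel, pvEraseFold_map, pvEraseFold_map, hdel]
  rw [PySem.List.foldl_prod_mk (f := fun (s : List String) (e : String × Int) => s ++ [e.1])
      (g := fun (s : Int) (e : String × Int) => s + e.2)]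
  rw [PySem.List.foldl_append_singleton_eq_map, PySem.List.foldl_add]

-- the main invariant: A's loop from index pre.length on pre ++ ts equals B's recursion on ts
theorem pvMain (k : Int) : ∀ (n : Nat) (ts pre : List (String × Int)), ts.length ≤ n →
    pvLoopA k ((pre ++ ts).map (fun p => p.1)) ((pre ++ ts).map (fun p => p.2)) pre.length =
      pvLoopB k ts := by
  intro n
  induction n with
  | zero =>
      intro ts pre h
      obtain rfl : ts = [] := by cases ts <;> simp_all
      rw [List.append_nil, pvLoopA_nil _ _ _ _ (by simp), pvLoopB]
  | succ n ih =>
      intro ts pre h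
      match ts with
      | [] => rw [List.append_nil, pvLoopA_nil _ _ _ _ (by simp), pvLoopB]
      | (a, c) :: rest =>
        rw [pvLoopB, pvStepB_spec]
        by_cases hrest : rest = []
        · subst hrest
          rw [pvLoopA_single]
          simp [pvLoopB]
        · rw [pvLoopA_cons k pre rest a c hrest]
          have hPC : (fun p : String × Int => hamming_le_py a p.1 k)
              = (fun p => close_py a p.1 k) := funext fun p => ham_eq_close a p.1 k
          have hPC2 : (fun p : String × Int => !hamming_le_py a p.1 k)
              = (fun p => !close_py a p.1 k) := funext fun p => by rw [ham_eq_close]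
          simp only [hPC, hPC2, List.nil_append]
          congr 1
          rw [show pre ++ (a, c) :: rest.filter (fun p => !close_py a p.1 k)
              = (pre ++ [(a, c)]) ++ rest.filter (fun p => !close_py a p.1 k) by simp,
            show pre.length + 1 = (pre ++ [(a, c)]).length by simp]
          exact ih (rest.filter (fun p => !close_py a p.1 k)) (pre ++ [(a, c)])
            (le_trans (List.length_filter_le _ _) (by simpa using h))

-- ===== VERDICT (by name: the statement is the Claim_ definition above) =====
theorem collapse_kmers_py_spec : Claim_equal_collapse_kmers_py := by
  intro names counts max_edit _
  unfold Spec_collapse_kmers_py collapse_kmers_py collapse_kmers_py_alt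
  simpa using pvMain max_edit (PySem.List.sorted2 (names.zip counts) (fun p => p.2) (fun p => p.1)).length
    (PySem.List.sorted2 (names.zip counts) (fun p => p.2) (fun p => p.1)) [] (le_refl _)
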